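-- pv_equiv track=rewrite | github.com/sanosenx86/loot-quest-helper | general_lib.py | format_code
-- ===== SOURCE A (Python) =====
-- def filter_code(code):
--     tmp=filter(lambda ch: ch in '0123456789-', code)
--     tmp="".join(list(tmp))
--     return tmp
--
-- def format_code(code):
--     tmp=''
--     code = filter_code(code) #always filter. Totally optional.
--     if code:
--         while(len(code)>3):
--             tmp+=code[:4]+'-'
--             code=code[4:]
--         tmp+=code
--         if tmp[-1]=='-':tmp=tmp[:-1]
--     return tmp
-- ===== SOURCE B (Python) =====
-- import re
--
-- def format_code(code):
--     code = ''.join(ch for ch in code if ch in '0123456789-')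
--     out = re.sub(r'(.{4})', r'\1-', code)  # dash after every complete 4-char group
--     if out.endswith('-'):
--         out = out[:-1]
--     return out
-- ===== Notes on version B (the rewrite author's own statement) =====
-- stated objective: idiomatic
-- what changed: Replaces the destructive while-loop (accumulate 4 chars plus a dash, reslice the rest) by a single regex substitution appending a dash after every complete 4-character group, followed by the same one-dash trailing strip.
import Mathlib
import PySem

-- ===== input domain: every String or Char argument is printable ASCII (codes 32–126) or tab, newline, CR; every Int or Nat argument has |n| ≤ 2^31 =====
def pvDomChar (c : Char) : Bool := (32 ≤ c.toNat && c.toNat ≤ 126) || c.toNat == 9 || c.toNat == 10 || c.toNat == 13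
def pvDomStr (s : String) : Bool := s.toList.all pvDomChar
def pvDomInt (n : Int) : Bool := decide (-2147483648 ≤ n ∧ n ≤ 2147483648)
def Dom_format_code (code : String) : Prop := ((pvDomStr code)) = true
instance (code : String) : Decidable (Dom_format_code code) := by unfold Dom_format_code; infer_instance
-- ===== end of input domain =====

-- B replaces A's destructive while-loop + slicing by one regex substitution that inserts a
-- dash after every complete 4-char group, keeping A's single trailing-dash strip (idiomatic).


-- ===== PORT A =====
-- filter(lambda ch: ch in '0123456789-', code); "".join(...)
-- ('ch in s' on a 1-char ch is substring membership = PySem.Chars.isIn [ch] s)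
def filter_code (code : String) : String :=
  String.ofList (code.toList.filter (fun ch => PySem.Chars.isIn [ch] "0123456789-".toList))

-- the while-loop of format_code; fuel only makes the recursion structural (fuel := len code
-- suffices: each iteration needs len > 3 and drops 4), state (tmp, code) as in the Python
def fcLoop (fuel : Nat) (tmp code : List Char) : List Char × List Char :=
  match fuel with
  | 0 => (tmp, code)
  | fuel + 1 =>
    if code.length > 3 then
      fcLoop fuel (tmp ++ PySem.List.slice code none (some 4) ++ ['-'])
        (PySem.List.slice code (some 4) none)
    else (tmp, code)

def format_code (code : String) : String :=
  let tmp : List Char := []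
  let code := (filter_code code).toList
  if code ≠ [] then
    -- while len(code)>3: tmp += code[:4]+'-'; code = code[4:]
    let (tmp, code) := fcLoop code.length tmp code
    -- tmp += code
    let tmp := tmp ++ code
    -- if tmp[-1]=='-': tmp = tmp[:-1]   (tmp is nonempty here, so tmp[-1] cannot raise)
    let tmp := if PySem.List.pyGet? tmp (-1) = some '-' then PySem.List.slice tmp none (some (-1)) else tmp
    String.ofList tmp
  else String.ofList tmp

-- ===== PORT B =====
-- re.sub(r'(.{4})', r'\1-', s): the regex scanner takes each non-overlapping complete run of
-- 4 characters left to right and appends '-'; a final run of < 4 characters is left as is.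
-- This helper is that substitution, step for step (exact: '.' matches any of our chars).
def reSub4Dash (l : List Char) : List Char :=
  if _h : 4 ≤ l.length then l.take 4 ++ '-' :: reSub4Dash (l.drop 4) else l
termination_by l.length
decreasing_by simp; omega

def format_code_alt (code : String) : String :=
  -- ''.join(ch for ch in code if ch in '0123456789-')
  let code := code.toList.filter (fun ch => PySem.Chars.isIn [ch] "0123456789-".toList)
  -- out = re.sub(r'(.{4})', r'\1-', code)
  let out := reSub4Dash code
  -- if out.endswith('-'): out = out[:-1]
  let out := if PySem.Chars.endswith out ['-'] then PySem.List.slice out none (some (-1)) else out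
  String.ofList out

-- ===== PRECONDITION & SPEC =====
def Spec_format_code (code : String) (out : String) : Prop := out = format_code_alt code
instance (code : String) (out : String) : Decidable (Spec_format_code code out) := by unfold Spec_format_code; infer_instance

-- ===== CLAIM (what is proved, stated in full; the proofs are below) =====
def Claim_equal_format_code : Prop := ∀ (code : String), Dom_format_code code → Spec_format_code code (format_code code)

-- ===== LEMMAS AND PROOFS =====

theorem slice_to4 (l : List Char) : PySem.List.slice l none (some 4) = l.take 4 := by
  have := PySem.List.slice_to (xs := l) (b := 4) (by norm_num)
  simpa using this

theorem slice_from4 (l : List Char) : PySem.List.slice l (some 4) none = l.drop 4 := by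
  have := PySem.List.slice_from (xs := l) (a := 4) (by norm_num)
  simpa using this

-- A's while loop concatenates its two state components to exactly B's regex substitution:
-- both append '-' after each complete leading group of 4 and stop on the short remainder.
theorem fcLoop_spec (fuel : Nat) (tmp l : List Char) (hf : l.length ≤ fuel) :
    (fcLoop fuel tmp l).1 ++ (fcLoop fuel tmp l).2 = tmp ++ reSub4Dash l := by
  induction fuel generalizing tmp l with
  | zero =>
    have : l = [] := List.eq_nil_of_length_eq_zero (by omega)
    subst this
    rw [reSub4Dash]
    simp [fcLoop]
  | succ fuel ih =>
    by_cases h3 : l.length > 3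
    · rw [show fcLoop (fuel+1) tmp l
          = fcLoop fuel (tmp ++ PySem.List.slice l none (some 4) ++ ['-'])
              (PySem.List.slice l (some 4) none) by simp [fcLoop, h3]]
      rw [slice_to4, slice_from4]
      rw [ih _ _ (by simp; omega)]
      rw [show reSub4Dash l = l.take 4 ++ '-' :: reSub4Dash (l.drop 4) by
        rw [reSub4Dash]; simp; omega]
      simp
    · rw [show fcLoop (fuel+1) tmp l = (tmp, l) by simp [fcLoop, h3]]
      rw [show reSub4Dash l = l by rw [reSub4Dash]; simp; omega]

theorem endswith_dash (out : List Char) :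
    PySem.Chars.endswith out ['-'] = true ↔ out.getLast? = some '-' := by
  rw [PySem.Chars.endswith_iff]
  constructor
  · rintro ⟨p, rfl⟩
    simp
  · intro h
    obtain ⟨l', rfl⟩ := List.getLast?_eq_some_iff.mp h
    exact ⟨l', rfl⟩

-- ===== VERDICT (by name: the statement is the Claim_ definition above) =====
theorem format_code_spec : Claim_equal_format_code := by
  intro code _hdom
  show format_code code = format_code_alt code
  simp only [format_code, format_code_alt, filter_code]
  rw [show (String.ofList (code.toList.filter (fun ch => PySem.Chars.isIn [ch] "0123456789-".toList))).toList
        = code.toList.filter (fun ch => PySem.Chars.isIn [ch] "0123456789-".toList) by simp]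
  set F := code.toList.filter (fun ch => PySem.Chars.isIn [ch] "0123456789-".toList) with hF
  by_cases hne : F = []
  · rw [hne]
    rw [show reSub4Dash ([] : List Char) = [] by rw [reSub4Dash]; simp]
    simp [PySem.Chars.endswith]
  · rw [if_pos hne]
    rcases hp : fcLoop F.length [] F with ⟨t, c⟩
    have hspec := fcLoop_spec F.length [] F le_rfl
    rw [hp] at hspec
    simp only [List.nil_append] at hspec
    simp only [hspec]
    congr 1
    by_cases hd : PySem.Chars.endswith (reSub4Dash F) ['-'] = true
    · rw [if_pos hd, if_pos (by rw [PySem.List.pyGet?_neg_one]; exact (endswith_dash _).mp hd)]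
    · rw [if_neg hd, if_neg (by
        rw [PySem.List.pyGet?_neg_one]
        intro hc
        exact hd ((endswith_dash _).mpr hc))]
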